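-- pv_equiv track=rewrite | github.com/cdaalexandre/docslice | src/docslice/domain/splitter.py | compute_split_points
-- ===== SOURCE A (Python) =====
-- _DEFAULT_MAX_BYTES = 3 * 1024 * 1024  # 3 MB
--
-- def compute_split_points(text: str, max_bytes: int = _DEFAULT_MAX_BYTES) -> list[int]:
--     """Compute byte offsets where text should be split.
--
--     Splits at paragraph boundaries (double newline) so no paragraph is
--     broken in half. If a single paragraph exceeds max_bytes, it is kept
--     whole in its own chunk.
--
--     Args:
--         text: The full normalized text.
--         max_bytes: Target maximum size per chunk in bytes.
--
--     Returns:
--         List of byte offsets (positions in the UTF-8 encoded text)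
--         where splits should occur. Empty list if text fits in one chunk.
--     """
--     encoded = text.encode("utf-8")
--     total = len(encoded)
--
--     if total <= max_bytes:
--         return []
--
--     split_points: list[int] = []
--     chunk_start = 0
--
--     while chunk_start < total:
--         chunk_end = chunk_start + max_bytes
--
--         if chunk_end >= total:
--             break
--
--         search_region = encoded[chunk_start:chunk_end]
--         para_marker = b"\n\n"
--         last_para = search_region.rfind(para_marker)
--
--         if last_para != -1:
--             split_at = chunk_start + last_para + len(para_marker)
--         else:
--             last_nl = search_region.rfind(b"\n")
--             split_at = chunk_start + last_nl + 1 if last_nl != -1 else chunk_end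
--
--         split_points.append(split_at)
--         chunk_start = split_at
--
--     return split_points
-- ===== SOURCE B (Python) =====
-- _DEFAULT_MAX_BYTES = 3 * 1024 * 1024  # 3 MB
--
-- def compute_split_points(text: str, max_bytes: int = _DEFAULT_MAX_BYTES) -> list[int]:
--     """Single forward pass: stream over the bytes once, remembering the end
--     offset of the most recent "\n\n" and "\n" occurrence seen so far; each
--     chunk's split point is read off these running maxima, so no per-chunk
--     slicing or backward search is needed."""
--     encoded = text.encode("utf-8")
--     total = len(encoded)
--
--     if total <= max_bytes:
--         return []
--
--     split_points: list[int] = []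
--     chunk_start = 0
--     i = 0
--     last2 = -1  # max p+2 over occurrences of b"\n\n" at p with p+2 <= i
--     last1 = -1  # max p+1 over occurrences of b"\n" at p with p+1 <= i
--
--     while chunk_start < total:
--         chunk_end = chunk_start + max_bytes
--         if chunk_end >= total:
--             break
--         while i < chunk_end:
--             if encoded[i] == 10:
--                 last1 = i + 1
--                 if i > 0 and encoded[i - 1] == 10:
--                     last2 = i + 1
--             i += 1
--         if last2 >= chunk_start + 2:
--             split_at = last2
--         elif last1 >= chunk_start + 1:
--             split_at = last1
--         else:
--             split_at = chunk_end
--         split_points.append(split_at)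
--         chunk_start = split_at
--
--     return split_points
-- ===== Notes on version B (the rewrite author's own statement) =====
-- stated objective: alternative
-- what changed: A re-slices the chunk window and does a backward rfind for "\n\n" / "\n" on every chunk; B streams forward over the bytes exactly once, maintaining the running end offsets of the most recent "\n\n" and "\n" occurrences and reading each chunk's split point off those maxima, so no slicing or backward search ever happens.
import Mathlib
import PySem

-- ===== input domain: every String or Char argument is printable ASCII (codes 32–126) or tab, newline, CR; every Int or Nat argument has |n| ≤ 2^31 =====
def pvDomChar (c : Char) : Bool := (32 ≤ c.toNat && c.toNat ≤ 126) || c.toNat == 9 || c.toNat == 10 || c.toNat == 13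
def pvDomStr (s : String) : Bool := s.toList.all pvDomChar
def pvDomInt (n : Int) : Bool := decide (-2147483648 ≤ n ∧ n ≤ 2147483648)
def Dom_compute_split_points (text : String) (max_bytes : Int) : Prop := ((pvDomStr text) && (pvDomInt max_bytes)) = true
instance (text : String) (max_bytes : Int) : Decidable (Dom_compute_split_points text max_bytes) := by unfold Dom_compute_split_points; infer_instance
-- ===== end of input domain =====

-- B replaces A's per-chunk slice + backward rfind with one forward streaming pass
-- keeping running "last \n\n end" / "last \n end" offsets (objective: alternative).

-- ===== PORT A =====
-- bytes.rfind ported as a scan from the right (last index j < n satisfying p, else -1)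
def pvRlast (p : Nat → Bool) : Nat → Int
  | 0 => -1
  | n+1 => if p n then (n : Int) else pvRlast p n

def pvRfind2 (s : List Char) : Int :=
  pvRlast (fun j => s.getD j ' ' == '\n' && s.getD (j+1) ' ' == '\n') (s.length - 1)

def pvRfind1 (s : List Char) : Int :=
  pvRlast (fun j => s.getD j ' ' == '\n') s.length

-- A's while loop; the fuel only makes it total (chunk_start strictly increases inside Pre_)
def pvALoop (l : List Char) (maxb total : Int) : Nat → Int → List Int → List Int
  | 0, _, acc => acc.reverse
  | fuel+1, cs, acc =>
    if cs < total then
      let ce := cs + maxb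
      if ce ≥ total then acc.reverse
      else
        let region := PySem.List.slice l (some cs) (some ce)
        let lp := pvRfind2 region
        let sp := if lp ≠ -1 then cs + lp + 2
          else
            let ln := pvRfind1 region
            if ln ≠ -1 then cs + ln + 1 else ce
        pvALoop l maxb total fuel sp (sp :: acc)
    else acc.reverse

def compute_split_points (text : String) (max_bytes : Int) : List Int :=
  let l := text.toList  -- text.encode("utf-8") is byte-per-char on the ASCII domain
  let total : Int := l.length
  if total ≤ max_bytes then []
  else pvALoop l max_bytes total (l.length + 1) 0 []

-- ===== PORT B =====
-- Source B's inner while: advance i to chunk_end updating last1/last2 (indexing in range inside Pre_)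
def pvScan (l : List Char) (e : Int) (i l1 l2 : Int) : Int × Int × Int :=
  if i < e then
    if PySem.List.pyGetD l i ' ' == '\n' then
      pvScan l e (i+1) (i+1)
        (if decide (0 < i) && (PySem.List.pyGetD l (i-1) ' ' == '\n') then i + 1 else l2)
    else pvScan l e (i+1) l1 l2
  else (i, l1, l2)
termination_by (e - i).toNat
decreasing_by all_goals (simp_wf; omega)

-- Source B's outer while; same fuel discipline as A's port
def pvBLoop (l : List Char) (maxb total : Int) : Nat → Int → Int → Int → Int → List Int → List Int
  | 0, _, _, _, _, acc => acc.reverse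
  | fuel+1, cs, i, l1, l2, acc =>
    if cs < total then
      let ce := cs + maxb
      if ce ≥ total then acc.reverse
      else
        let s := pvScan l ce i l1 l2
        let sp := if s.2.2 ≥ cs + 2 then s.2.2
                  else if s.2.1 ≥ cs + 1 then s.2.1 else ce
        pvBLoop l maxb total fuel sp s.1 s.2.1 s.2.2 (sp :: acc)
    else acc.reverse

def compute_split_points_alt (text : String) (max_bytes : Int) : List Int :=
  let l := text.toList
  let total : Int := l.length
  if total ≤ max_bytes then []
  else pvBLoop l max_bytes total (l.length + 1) 0 0 (-1) (-1) []

-- ===== PRECONDITION & SPEC =====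
-- Pre_ excludes max_bytes ≤ 0 with NONEMPTY text longer than max_bytes: there A's (and
-- B's) while loop never makes progress, so the Python diverges and returns nothing.
def Pre_compute_split_points (text : String) (max_bytes : Int) : Prop :=
  (text.toList.length : Int) ≤ max_bytes ∨ 1 ≤ max_bytes ∨ text.toList = []
instance (text : String) (max_bytes : Int) : Decidable (Pre_compute_split_points text max_bytes) := by
  unfold Pre_compute_split_points; infer_instance

def pvWitness_compute_split_points : String × Int := ("a\n\nbb cc", 3)

def Spec_compute_split_points (text : String) (max_bytes : Int) (out : List Int) : Prop := out = compute_split_points_alt text max_bytes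
instance (text : String) (max_bytes : Int) (out : List Int) : Decidable (Spec_compute_split_points text max_bytes out) := by unfold Spec_compute_split_points; infer_instance

-- ===== CLAIM (what is proved, stated in full; the proofs are below) =====
def Claim_equal_compute_split_points : Prop := ∀ (text : String) (max_bytes : Int), Dom_compute_split_points text max_bytes → Pre_compute_split_points text max_bytes → Spec_compute_split_points text max_bytes (compute_split_points text max_bytes)

-- ===== LEMMAS AND PROOFS =====

-- last-newline predicates on absolute positions
def pvP1 (l : List Char) (t : Nat) : Bool := l.getD t ' ' == '\n'
def pvP2 (l : List Char) (t : Nat) : Bool := (l.getD t ' ' == '\n') && (l.getD (t+1) ' ' == '\n')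

-- running maxima B maintains, as functions of the scan position
def pvFwd1 (l : List Char) : Nat → Int
  | 0 => -1
  | n+1 => if l.getD n ' ' == '\n' then ((n : Int) + 1) else pvFwd1 l n

def pvFwd2 (l : List Char) : Nat → Int
  | 0 => -1
  | n+1 => if (l.getD n ' ' == '\n') && (decide (0 < n) && (l.getD (n-1) ' ' == '\n'))
           then ((n : Int) + 1) else pvFwd2 l n

theorem pvRlast_bounds (p : Nat → Bool) (n : Nat) : -1 ≤ pvRlast p n ∧ pvRlast p n < (n : Int) := by
  induction n with
  | zero => simp [pvRlast]
  | succ n ih => simp only [pvRlast]; split <;> [constructor <;> omega; exact ⟨ih.1, by have := ih.2; omega⟩]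

theorem pvRlast_congr (p q : Nat → Bool) (n : Nat) (h : ∀ j < n, p j = q j) :
    pvRlast p n = pvRlast q n := by
  induction n with
  | zero => rfl
  | succ n ih =>
    simp only [pvRlast, h n (by omega)]
    split <;> [rfl; exact ih (fun j hj => h j (by omega))]

theorem pvRlast_shift (p : Nat → Bool) (cs k : Nat) :
    pvRlast (fun j => p (cs + j)) k =
      if (cs : Int) ≤ pvRlast p (cs + k) then pvRlast p (cs + k) - cs else -1 := by
  induction k with
  | zero =>
    have := pvRlast_bounds p cs
    simp only [Nat.add_zero]
    rw [if_neg (by omega)]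
    rfl
  | succ k ih =>
    have hb := pvRlast_bounds p (cs + k)
    rw [show cs + (k + 1) = (cs + k) + 1 from rfl]
    simp only [pvRlast]
    by_cases hp : p (cs + k) = true
    · simp only [hp, if_true]
      rw [if_pos (by push_cast; omega)]
      push_cast
      ring
    · simp only [if_neg hp]
      exact ih

theorem pvFwd1_eq (l : List Char) (n : Nat) :
    pvFwd1 l n = if pvRlast (pvP1 l) n < 0 then -1 else pvRlast (pvP1 l) n + 1 := by
  induction n with
  | zero => simp [pvFwd1, pvRlast]
  | succ n ih =>
    have hb := pvRlast_bounds (pvP1 l) n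
    simp only [pvFwd1, pvRlast, pvP1]
    split
    · rw [if_neg (by omega)]
    · exact ih

theorem pvFwd2_eq (l : List Char) (n : Nat) :
    pvFwd2 l n = if pvRlast (pvP2 l) (n - 1) < 0 then -1 else pvRlast (pvP2 l) (n - 1) + 2 := by
  induction n with
  | zero => simp [pvFwd2, pvRlast]
  | succ n ih =>
    rcases Nat.eq_zero_or_pos n with hn | hn
    · subst hn; simp [pvFwd2, pvRlast]
    · obtain ⟨m, rfl⟩ : ∃ m, n = m + 1 := ⟨n - 1, by omega⟩
      have hb := pvRlast_bounds (pvP2 l) m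
      simp only [Nat.add_sub_cancel] at ih ⊢
      have e1 : pvFwd2 l ((m + 1) + 1) =
          if (l.getD (m + 1) ' ' == '\n') && (decide (0 < m + 1) && (l.getD (m + 1 - 1) ' ' == '\n'))
          then (((m + 1 : Nat) : Int) + 1) else pvFwd2 l (m + 1) := rfl
      have e2 : pvRlast (pvP2 l) (m + 1) =
          if pvP2 l m then ((m : Nat) : Int) else pvRlast (pvP2 l) m := rfl
      have hc : ((l.getD (m + 1) ' ' == '\n') &&
          (decide (0 < m + 1) && (l.getD (m + 1 - 1) ' ' == '\n'))) = pvP2 l m := by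
        unfold pvP2
        rw [show m + 1 - 1 = m from rfl, show decide (0 < m + 1) = true from by simp,
          Bool.true_and, Bool.and_comm]
      rw [e1, e2, hc]
      by_cases hp : pvP2 l m = true
      · simp only [hp, if_true]
        rw [if_neg (by omega)]
        push_cast
        ring
      · simp only [if_neg hp]
        exact ih

-- the region's getD agrees with the absolute one
theorem pvSlice_getD (l : List Char) (cs e j : Nat) (hj : j < e - cs) (_he : e ≤ l.length) :
    (PySem.List.slice l (some (cs : Int)) (some (e : Int))).getD j ' ' = l.getD (cs + j) ' ' := by
  rw [PySem.List.slice_natCast]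
  simp only [List.getD, List.getElem?_take, List.getElem?_drop]
  rw [if_pos hj]

theorem pvSlice_length (l : List Char) (cs e : Nat) (_hce : cs ≤ e) (he : e ≤ l.length) :
    (PySem.List.slice l (some (cs : Int)) (some (e : Int))).length = e - cs := by
  rw [PySem.List.slice_natCast]
  simp [List.length_take, List.length_drop]
  omega

theorem pvRfind1_abs (l : List Char) (cs e : Nat) (hce : cs ≤ e) (he : e ≤ l.length) :
    pvRfind1 (PySem.List.slice l (some (cs : Int)) (some (e : Int))) =
      if (cs : Int) ≤ pvRlast (pvP1 l) e then pvRlast (pvP1 l) e - cs else -1 := by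
  unfold pvRfind1
  rw [pvSlice_length l cs e hce he]
  rw [pvRlast_congr _ (fun j => pvP1 l (cs + j)) (e - cs)
    (fun j hj => by rw [pvSlice_getD l cs e j hj he]; rfl)]
  rw [pvRlast_shift, Nat.add_sub_cancel' hce]

theorem pvRfind2_abs (l : List Char) (cs e : Nat) (hce : cs < e) (he : e ≤ l.length) :
    pvRfind2 (PySem.List.slice l (some (cs : Int)) (some (e : Int))) =
      if (cs : Int) ≤ pvRlast (pvP2 l) (e - 1) then pvRlast (pvP2 l) (e - 1) - cs else -1 := by
  unfold pvRfind2
  rw [pvSlice_length l cs e (by omega) he]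
  rw [pvRlast_congr _ (fun j => pvP2 l (cs + j)) (e - cs - 1)
    (fun j hj => by
      simp only [pvP2]
      rw [pvSlice_getD l cs e j (by omega) he, pvSlice_getD l cs e (j+1) (by omega) he,
        show cs + (j + 1) = cs + j + 1 from (Nat.add_assoc cs j 1).symm])]
  rw [pvRlast_shift, show cs + (e - cs - 1) = e - 1 from by omega]

-- the split point A computes for one chunk equals the one B computes
theorem pvChunk_eq (l : List Char) (cs e : Nat) (hce : cs < e) (he : e ≤ l.length) :
    (let region := PySem.List.slice l (some (cs : Int)) (some (e : Int));
     let lp := pvRfind2 region;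
     if lp ≠ -1 then (cs : Int) + lp + 2
     else
       let ln := pvRfind1 region;
       if ln ≠ -1 then (cs : Int) + ln + 1 else (e : Int))
    = (if pvFwd2 l e ≥ (cs : Int) + 2 then pvFwd2 l e
       else if pvFwd1 l e ≥ (cs : Int) + 1 then pvFwd1 l e else (e : Int)) := by
  have h2 := pvRfind2_abs l cs e hce he
  have h1 := pvRfind1_abs l cs e (by omega) he
  have b2 := pvRlast_bounds (pvP2 l) (e - 1)
  have b1 := pvRlast_bounds (pvP1 l) e
  simp only [h2, h1, pvFwd2_eq, pvFwd1_eq]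
  split_ifs <;> omega

-- running Source B's inner scan from a reached position lands on the running maxima at chunk_end
theorem pvScan_spec (l : List Char) (n : Nat) :
    ∀ k m : Nat, m + k = n →
      pvScan l (n : Int) (m : Int) (pvFwd1 l m) (pvFwd2 l m) =
        ((n : Int), pvFwd1 l n, pvFwd2 l n) := by
  intro k
  induction k with
  | zero =>
    intro m hm
    rw [pvScan]
    simp only [Nat.add_zero] at hm
    subst hm
    simp
  | succ k ih =>
    intro m hm
    have hlt : (m : Int) < n := by omega
    rw [pvScan, if_pos hlt]
    have hget : PySem.List.pyGetD l (m : Int) ' ' = l.getD m ' ' := PySem.List.pyGetD_natCast ..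
    have hstep1 : ((m : Int) + 1) = ((m + 1 : Nat) : Int) := by push_cast; ring
    have u1 : pvFwd1 l (m + 1) =
        if l.getD m ' ' == '\n' then (((m : Nat) : Int) + 1) else pvFwd1 l m := rfl
    have u2 : pvFwd2 l (m + 1) =
        if (l.getD m ' ' == '\n') && (decide (0 < m) && (l.getD (m - 1) ' ' == '\n'))
        then (((m : Nat) : Int) + 1) else pvFwd2 l m := rfl
    rcases hc : (l.getD m ' ' == '\n') with _ | _
    · rw [hget, hc]
      simp only [Bool.false_eq_true, if_false]
      have e1 : pvFwd1 l (m + 1) = pvFwd1 l m := by rw [u1, hc]; simp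
      have e2 : pvFwd2 l (m + 1) = pvFwd2 l m := by rw [u2, hc]; simp
      rw [hstep1, ← e1, ← e2]
      exact ih (m + 1) (by omega)
    · rw [hget, hc]
      simp only [if_true]
      have e1 : pvFwd1 l (m + 1) = (m : Int) + 1 := by rw [u1, hc]; simp
      have e2 : (if decide (0 < (m : Int)) && (PySem.List.pyGetD l ((m : Int) - 1) ' ' == '\n')
          then (m : Int) + 1 else pvFwd2 l m) = pvFwd2 l (m + 1) := by
        rcases Nat.eq_zero_or_pos m with hm0 | hm0
        · subst hm0
          rw [u2, hc]
          simp
        · have hd : decide (0 < (m : Int)) = true := by simp only [decide_eq_true_eq]; omega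
          have hd' : decide (0 < m) = true := by simp [hm0]
          have hm1 : (m : Int) - 1 = ((m - 1 : Nat) : Int) := by omega
          rw [u2, hc, hd, hd', hm1, PySem.List.pyGetD_natCast]
          simp
      have goal' := ih (m + 1) (by omega)
      rw [hstep1] at e2
      have e1' : pvFwd1 l (m + 1) = ((m + 1 : Nat) : Int) := by rw [e1, hstep1]
      rw [e1', ← e2] at goal'
      rw [hstep1]
      exact goal'

-- the two while loops agree step by step
theorem pvLoop_eq (l : List Char) (maxb : Int) (hmb : 1 ≤ maxb) :
    ∀ (fuel : Nat) (cs m : Nat) (acc : List Int), (m : Int) ≤ (cs : Int) + maxb →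
      pvALoop l maxb (l.length : Int) fuel (cs : Int) acc =
        pvBLoop l maxb (l.length : Int) fuel (cs : Int) (m : Int) (pvFwd1 l m) (pvFwd2 l m) acc := by
  intro fuel
  induction fuel with
  | zero => intro cs m acc _; rfl
  | succ fuel ih =>
    intro cs m acc hm
    simp only [pvALoop, pvBLoop]
    split
    · split
      · rfl
      · -- continuing: ce < total
        rename_i hcs hce
        set ce := (cs : Int) + maxb with hcedef
        have hce' : ce < (l.length : Int) := by omega
        have hcepos : 0 ≤ ce := by omega
        obtain ⟨e, he⟩ : ∃ e : Nat, (e : Int) = ce := ⟨ce.toNat, by omega⟩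
        have hcse : cs < e := by omega
        have helen : e ≤ l.length := by omega
        have hscan : pvScan l ce (m : Int) (pvFwd1 l m) (pvFwd2 l m) =
            ((e : Int), pvFwd1 l e, pvFwd2 l e) := by
          rw [← he]; exact pvScan_spec l e (e - m) m (by omega)
        rw [hscan]
        have hchunk := pvChunk_eq l cs e hcse helen
        rw [he] at hchunk
        simp only at hchunk ⊢
        rw [hchunk]
        set sp := (if pvFwd2 l e ≥ (cs : Int) + 2 then pvFwd2 l e
          else if pvFwd1 l e ≥ (cs : Int) + 1 then pvFwd1 l e else ce) with hspdef
        have hsp : (cs : Int) + 1 ≤ sp := by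
          have b2 := pvRlast_bounds (pvP2 l) (e - 1)
          have b1 := pvRlast_bounds (pvP1 l) e
          rw [hspdef]
          split_ifs <;> [omega; omega; omega]
        obtain ⟨cs', hcs'⟩ : ∃ c : Nat, (c : Int) = sp := ⟨sp.toNat, by omega⟩
        rw [← hcs']
        exact ih cs' e ((cs' : Int) :: acc) (by omega)
    · rfl

-- ===== VERDICT (by name: the statement is the Claim_ definition above) =====
theorem compute_split_points_spec : Claim_equal_compute_split_points := by
  intro text max_bytes _hdom hpre
  unfold Spec_compute_split_points compute_split_points compute_split_points_alt
  simp only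
  split
  · rfl
  · rename_i hgt
    rcases hpre with h | hmb | hnil
    · exact absurd h hgt
    · have h0 : ((0 : Nat) : Int) = (0 : Int) := rfl
      rw [← h0]
      rw [pvLoop_eq text.toList max_bytes hmb (text.toList.length + 1) 0 0 [] (by simp; omega)]
      rfl
    · rw [hnil]
      simp [pvALoop, pvBLoop]
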